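-- pv_equiv track=rewrite | github.com/baiwan-chenhao/rewrite | leetcode_gen_week4.py | solve
-- ===== SOURCE A (Python) =====
-- from typing import List, Tuple
--
-- def solve(nums: List[int], queries: List[List[int]]) -> bool:
--     n = len(nums)
--     diff = [0] * (n + 1)
--     for l, r in queries:
--         # 区间 [l,r] 中的数都加一
--         diff[l] += 1
--         diff[r + 1] -= 1
--
--     from itertools import accumulate
--     for x, sum_d in zip(nums, accumulate(diff)):
--         # 此时 sum_d 表示 x=nums[i] 要减掉多少
--         if x > sum_d:  # x 无法变成 0
--             return False
--     return True
-- ===== SOURCE B (Python) =====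
-- def solve(nums, queries):
--     # Sort left and right endpoints separately; sweep i with two pointers:
--     # coverage at i = (# l <= i) - (# r < i).
--     ls = sorted(l for l, r in queries)
--     rs = sorted(r for l, r in queries)
--     m = len(queries)
--     pl = pr = 0
--     for i, x in enumerate(nums):
--         while pl < m and ls[pl] <= i:
--             pl += 1
--         while pr < m and rs[pr] < i:
--             pr += 1
--         if x > pl - pr:
--             return False
--     return True
-- ===== Notes on version B (the rewrite author's own statement) =====
-- stated objective: alternative
-- what changed: Replaces the difference-array + running prefix sum with a sort-then-sweep: the left and right endpoints are sorted separately and two pointers advanced per index give the live coverage count.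
-- outside the precondition, e.g. on solve([1, 0], [[-2, 0]]): A returns False, B returns True; on solve([0], [[2, 0]]): A raises IndexError, B returns True
import Mathlib
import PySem

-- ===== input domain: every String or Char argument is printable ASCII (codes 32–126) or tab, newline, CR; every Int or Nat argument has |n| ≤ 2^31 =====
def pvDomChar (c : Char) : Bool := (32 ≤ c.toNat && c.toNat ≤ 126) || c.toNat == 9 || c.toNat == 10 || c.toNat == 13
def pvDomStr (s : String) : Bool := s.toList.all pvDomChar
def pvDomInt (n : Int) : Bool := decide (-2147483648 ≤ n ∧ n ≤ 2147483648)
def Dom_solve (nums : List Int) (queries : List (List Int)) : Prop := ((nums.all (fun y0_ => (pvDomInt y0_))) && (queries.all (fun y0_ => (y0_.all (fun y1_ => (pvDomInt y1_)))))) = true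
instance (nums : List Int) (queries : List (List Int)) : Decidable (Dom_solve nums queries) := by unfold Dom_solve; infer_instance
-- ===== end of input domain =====

-- B replaces A's difference array + prefix sum with sorted endpoint lists swept by two pointers (alternative decomposition, not claimed faster); equivalence proved on well-indexed queries (Pre_).


-- ===== PORT A =====
-- diff[i] += v ; exact where Python does not raise (Pre_ keeps the index in range and non-negative)
def solveBump (d : List Int) (i : Int) (v : Int) : List Int :=
  PySem.List.pySetD d i (PySem.List.pyGetD d i 0 + v)

-- 'for l, r in queries: diff[l] += 1; diff[r+1] -= 1' (on a non-pair query Python raises ValueError; excluded by Pre_)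
def solveDiffLoop (d : List Int) (qs : List (List Int)) : List Int :=
  qs.foldl (fun d q =>
    match q with
    | [l, r] => solveBump (solveBump d l 1) (r + 1) (-1)
    | _ => d) d

-- itertools.accumulate
def solveAccum : List Int → Int → List Int
  | [], _ => []
  | x :: xs, acc => (acc + x) :: solveAccum xs (acc + x)

def solveLoop : List (Int × Int) → Bool
  | [] => true
  | (x, s) :: rest => if x > s then false else solveLoop rest

def solve (nums : List Int) (queries : List (List Int)) : Bool :=
  let n := nums.length
  let diff := solveDiffLoop (List.replicate (n + 1) (0 : Int)) queries
  solveLoop (nums.zip (solveAccum diff 0))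

-- ===== PORT B =====
-- 'for l, r in queries' unpacking inside the generator expressions (non-pair: Python raises ValueError; excluded by Pre_)
def altFst : List Int → Int
  | [l, _] => l
  | _ => 0
def altSnd : List Int → Int
  | [_, r] => r
  | _ => 0

-- 'while p < len(xs) and c(xs[p]): p += 1'
def altAdv (xs : List Int) (c : Int → Bool) (p : Nat) : Nat :=
  if h : p < xs.length then
    if c xs[p] then altAdv xs c (p + 1) else p
  else p
termination_by xs.length - p

def altLoop (ls rs : List Int) : List Int → Int → Nat → Nat → Bool
  | [], _, _, _ => true
  | x :: rest, i, pl, pr =>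
    let pl' := altAdv ls (fun v => v ≤ i) pl
    let pr' := altAdv rs (fun v => v < i) pr
    if x > (pl' : Int) - (pr' : Int) then false else altLoop ls rs rest (i + 1) pl' pr'

def solve_alt (nums : List Int) (queries : List (List Int)) : Bool :=
  let ls := PySem.List.sorted (queries.map altFst) (fun x => x) false
  let rs := PySem.List.sorted (queries.map altSnd) (fun x => x) false
  altLoop ls rs nums 0 0 0

-- ===== PRECONDITION & SPEC =====
-- Pre_ restricts to the natural domain of well-formed queries: outside it A either raises
-- (ValueError unpacking a non-pair, IndexError on an out-of-range endpoint) or silently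
-- applies Python's negative-index wraparound to the difference array.
def Pre_solve (nums : List Int) (queries : List (List Int)) : Prop :=
  ∀ q ∈ queries, q.length = 2 ∧ 0 ≤ q.getD 0 0 ∧ q.getD 0 0 ≤ (nums.length : Int)
    ∧ -1 ≤ q.getD 1 0 ∧ q.getD 1 0 ≤ (nums.length : Int) - 1
instance (nums : List Int) (queries : List (List Int)) : Decidable (Pre_solve nums queries) := by
  unfold Pre_solve; infer_instance

def pvWitness_solve : List Int × List (List Int) := ([1, 0], [[0, 1]])

def Spec_solve (nums : List Int) (queries : List (List Int)) (out : Bool) : Prop := out = solve_alt nums queries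
instance (nums : List Int) (queries : List (List Int)) (out : Bool) : Decidable (Spec_solve nums queries out) := by unfold Spec_solve; infer_instance

-- ===== CLAIM (what is proved, stated in full; the proofs are below) =====
def Claim_equal_solve : Prop := ∀ (nums : List Int) (queries : List (List Int)), Dom_solve nums queries → Pre_solve nums queries → Spec_solve nums queries (solve nums queries)

-- ===== LEMMAS AND PROOFS =====

-- the common reference: scan the indices, comparing each value to the coverage count
def refIdx (lsm rsm : List Int) : List Int → Int → Bool
  | [], _ => true
  | x :: rest, i =>
    if x > ((lsm.countP (fun v => decide (v ≤ i)) : Int) - (rsm.countP (fun v => decide (v < i)) : Int)) then false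
    else refIdx lsm rsm rest (i + 1)

theorem refIdx_perm (ls ls' rs rs' : List Int) (hl : ls.Perm ls') (hr : rs.Perm rs') :
    ∀ xs i, refIdx ls rs xs i = refIdx ls' rs' xs i := by
  intro xs
  induction xs with
  | nil => intro i; rfl
  | cons x rest ih =>
    intro i
    simp [refIdx, hl.countP_eq, hr.countP_eq, ih]

theorem altAdv_eq (xs : List Int) (c : Int → Bool) :
    ∀ p, altAdv xs c p = p + ((xs.drop p).takeWhile c).length := by
  intro p
  induction h : xs.length - p using Nat.strong_induction_on generalizing p with
  | _ n ih =>
  rw [altAdv]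
  split
  · rename_i hlt
    rw [List.drop_eq_getElem_cons hlt]
    by_cases hc : c xs[p]
    · simp only [if_true, List.takeWhile_cons, hc, List.length_cons]
      rw [ih (xs.length - (p+1)) (by omega) (p+1) rfl]
      omega
    · simp [hc]
  · rename_i hge
    simp [List.drop_eq_nil_of_le (by omega : xs.length ≤ p)]

theorem countP_takeWhile (c : Int → Bool) (hc : ∀ a b : Int, a ≤ b → c b = true → c a = true) :
    ∀ xs : List Int, xs.Pairwise (· ≤ ·) → xs.countP c = (xs.takeWhile c).length := by
  intro xs
  induction xs with
  | nil => intro; rfl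
  | cons x rest ih =>
    intro hp
    rw [List.pairwise_cons] at hp
    by_cases hx : c x
    · simp [hx, ih hp.2]
    · have hz : rest.countP c = 0 :=
        List.countP_eq_zero.mpr (fun y hy hcy => hx (hc x y (hp.1 y hy) hcy))
      simp [hx, hz]

theorem altAdv_count (xs : List Int) (c : Int → Bool)
    (hc : ∀ a b : Int, a ≤ b → c b = true → c a = true)
    (hs : xs.Pairwise (· ≤ ·)) (p : Nat) (hp : p ≤ xs.countP c) :
    altAdv xs c p = xs.countP c := by
  rw [altAdv_eq, countP_takeWhile c hc xs hs] at *
  set T := xs.takeWhile c with hT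
  have hxs : xs = T ++ xs.dropWhile c := (List.takeWhile_append_dropWhile).symm
  have hdrop : xs.drop p = T.drop p ++ xs.dropWhile c := by
    conv_lhs => rw [hxs]
    rw [List.drop_append_of_le_length hp]
  rw [hdrop]
  have h1 : (T.drop p).takeWhile c = T.drop p := by
    rw [List.takeWhile_eq_self_iff]
    intro y hy
    exact List.mem_takeWhile_imp (List.mem_of_mem_drop hy)
  have h2 : (xs.dropWhile c).takeWhile c = [] := by
    cases hD : xs.dropWhile c with
    | nil => rfl
    | cons a t =>
      have : ¬ c a = true := by
        have := List.head?_dropWhile_not c xs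
        rw [hD] at this; simpa using this
      simp [this]
  rw [List.takeWhile_append, h1, h2]
  simp [List.length_drop]
  omega

theorem altLoop_eq (ls rs : List Int) (hl : ls.Pairwise (· ≤ ·)) (hr : rs.Pairwise (· ≤ ·)) :
    ∀ (xs : List Int) (i : Int) (pl pr : Nat),
      pl ≤ ls.countP (fun v => decide (v ≤ i)) → pr ≤ rs.countP (fun v => decide (v < i)) →
      altLoop ls rs xs i pl pr = refIdx ls rs xs i := by
  intro xs
  induction xs with
  | nil => intro i pl pr _ _; rfl
  | cons x rest ih =>
    intro i pl pr hpl hpr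
    have hcl : ∀ a b : Int, a ≤ b → decide (b ≤ i) = true → decide (a ≤ i) = true := by
      intro a b hab h; simp at *; omega
    have hcr : ∀ a b : Int, a ≤ b → decide (b < i) = true → decide (a < i) = true := by
      intro a b hab h; simp at *; omega
    have e1 : altAdv ls (fun v => v ≤ i) pl = ls.countP (fun v => decide (v ≤ i)) :=
      altAdv_count ls _ hcl hl pl hpl
    have e2 : altAdv rs (fun v => v < i) pr = rs.countP (fun v => decide (v < i)) :=
      altAdv_count rs _ hcr hr pr hpr
    simp only [altLoop, refIdx, e1, e2]
    split
    · rfl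
    · exact ih (i + 1)  _ _
        (List.countP_mono_left (fun v _ h => by simp at *; omega))
        (List.countP_mono_left (fun v _ h => by simp at *; omega))

theorem sum_take_set (v : Int) : ∀ (d : List Int) (j : Nat), j < d.length → ∀ m : Nat,
    ((d.set j (d[j]! + v)).take m).sum = (d.take m).sum + if j < m then v else 0 := by
  intro d
  induction d with
  | nil => intro j hj; simp at hj
  | cons x xs ih =>
    intro j hj m
    cases j with
    | zero =>
      cases m with
      | zero => simp
      | succ m => simp [List.set, List.take_succ_cons]; ring
    | succ j =>
      cases m with
      | zero => simp
      | succ m =>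
        have hj' : j < xs.length := by simpa using hj
        simp only [List.set, List.take_succ_cons, List.sum_cons]
        have := ih j hj' m
        simp only [List.getElem!_cons_succ] at *
        rw [this]
        by_cases h : j < m
        · rw [if_pos h, if_pos (by omega : j + 1 < m + 1)]; ring
        · rw [if_neg h, if_neg (by omega : ¬ (j + 1 < m + 1))]; ring

theorem solveBump_length (d : List Int) (i v : Int) : (solveBump d i v).length = d.length := by
  simp [solveBump, PySem.List.length_pySetD]

theorem sum_take_bump (d : List Int) (i : Int) (hi : 0 ≤ i) (hlt : i < (d.length : Int)) (v : Int) (m : Nat) :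
    ((solveBump d i v).take m).sum = (d.take m).sum + if i < (m : Int) then v else 0 := by
  have hn : i.toNat < d.length := by omega
  rw [solveBump, PySem.List.pySetD_of_nonneg _ _ hi, PySem.List.pyGetD_of_nonneg _ _ hi]
  have hg : d.getD i.toNat 0 = d[i.toNat]! := by
    rw [List.getD_eq_getElem _ _ hn, getElem!_pos d i.toNat hn]
  rw [hg, sum_take_set v d i.toNat hn m]
  congr 1
  have : i.toNat < m ↔ i < (m : Int) := by omega
  split <;> split <;> first | rfl | omega

theorem solveDiffLoop_length : ∀ (qs : List (List Int)) (d : List Int),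
    (solveDiffLoop d qs).length = d.length := by
  intro qs
  induction qs with
  | nil => intro d; rfl
  | cons q rest ih =>
    intro d
    show (solveDiffLoop _ rest).length = _
    rw [ih]
    match q with
    | [] => rfl
    | [a] => rfl
    | [l, r] => simp [solveBump_length]
    | a :: b :: c :: t => rfl

theorem sum_take_diffLoop (n : Nat) :
    ∀ (qs : List (List Int))
      (_hq : ∀ q ∈ qs, q.length = 2 ∧ 0 ≤ q.getD 0 0 ∧ q.getD 0 0 ≤ (n : Int)
        ∧ -1 ≤ q.getD 1 0 ∧ q.getD 1 0 ≤ (n : Int) - 1)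
      (d : List Int) (_hd : d.length = n + 1) (k : Nat) (_hk : k < n),
      ((solveDiffLoop d qs).take (k + 1)).sum
        = (d.take (k + 1)).sum
          + (qs.countP (fun q => decide (altFst q ≤ (k : Int))) : Int)
          - (qs.countP (fun q => decide (altSnd q < (k : Int))) : Int) := by
  intro qs
  induction qs with
  | nil => intro _ d hd k hk; simp [solveDiffLoop]
  | cons q rest ih =>
    intro hq d hd k hk
    obtain ⟨hlen2, h0l, h0r, h1l, h1r⟩ := hq q (List.mem_cons_self ..)
    match q, hlen2 with
    | [l, r], _ =>
      simp only [List.getD_cons_zero, List.getD_cons_succ] at h0l h0r h1l h1r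
      have hstep : solveDiffLoop d ([l, r] :: rest)
          = solveDiffLoop (solveBump (solveBump d l 1) (r + 1) (-1)) rest := rfl
      rw [hstep]
      have hlen' : (solveBump (solveBump d l 1) (r + 1) (-1)).length = n + 1 := by
        simp [solveBump_length, hd]
      rw [ih (fun q hq' => hq q (List.mem_cons_of_mem _ hq')) _ hlen' k hk]
      have hb1 : ((solveBump d l 1).length : Int) = (n : Int) + 1 := by
        simp [solveBump_length, hd]
      rw [sum_take_bump _ _ (by omega) (by rw [hb1]; omega) _ _,
          sum_take_bump _ _ h0l (by rw [hd]; omega) _ _]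
      simp only [List.countP_cons, altFst, altSnd]
      by_cases hlk : l ≤ (k : Int) <;> by_cases hrk : r < (k : Int) <;>
        simp [hlk, hrk] <;> ring

theorem solveAccum_length : ∀ (d : List Int) (acc : Int), (solveAccum d acc).length = d.length := by
  intro d; induction d with
  | nil => intro acc; rfl
  | cons x xs ih => intro acc; simp [solveAccum, ih]

theorem solveAccum_getElem : ∀ (d : List Int) (acc : Int) (k : Nat) (hk : k < d.length),
    (solveAccum d acc)[k]'(by rw [solveAccum_length]; exact hk) = acc + (d.take (k + 1)).sum := by
  intro d
  induction d with
  | nil => intro acc k hk; simp at hk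
  | cons x xs ih =>
    intro acc k hk
    cases k with
    | zero => simp [solveAccum]
    | succ k =>
      have hk' : k < xs.length := by simpa using hk
      simp only [solveAccum, List.getElem_cons_succ, List.take_succ_cons, List.sum_cons]
      rw [ih (acc + x) k hk']
      ring

theorem solveLoop_eq_refIdx (lsm rsm : List Int) :
    ∀ (xs sums : List Int) (i0 : Int) (hlen : xs.length ≤ sums.length)
      (_hval : ∀ k (hk : k < xs.length),
        sums[k]'(lt_of_lt_of_le hk hlen)
          = (lsm.countP (fun v => decide (v ≤ i0 + (k : Int))) : Int)
            - (rsm.countP (fun v => decide (v < i0 + (k : Int))) : Int)),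
      solveLoop (xs.zip sums) = refIdx lsm rsm xs i0 := by
  intro xs
  induction xs with
  | nil => intro sums i0 _ _; rfl
  | cons x rest ih =>
    intro sums i0 hlen hval
    match sums, hlen with
    | s :: sums', hlen =>
      have h0 := hval 0 (by simp)
      simp only [List.getElem_cons_zero, Int.natCast_zero, add_zero] at h0
      simp only [List.zip_cons_cons, solveLoop, refIdx, h0]
      split
      · rfl
      · exact ih sums' (i0 + 1) (Nat.le_of_succ_le_succ hlen)
          (fun k hk => by
            have := hval (k + 1) (by simpa using Nat.succ_lt_succ hk)
            simpa [add_assoc, add_comm, add_left_comm] using this)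

-- ===== VERDICT (by name: the statement is the Claim_ definition above) =====
theorem solve_spec : Claim_equal_solve := by
  intro nums queries _ hpre
  unfold Spec_solve
  have hA : solve nums queries
      = refIdx (queries.map altFst) (queries.map altSnd) nums 0 := by
    show solveLoop (nums.zip (solveAccum (solveDiffLoop (List.replicate (nums.length + 1) (0 : Int)) queries) 0)) = _
    have hdl : (solveDiffLoop (List.replicate (nums.length + 1) (0 : Int)) queries).length
        = nums.length + 1 := by rw [solveDiffLoop_length]; simp
    refine solveLoop_eq_refIdx _ _ nums _ 0 (by rw [solveAccum_length, hdl]; omega) ?_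
    intro k hk
    rw [solveAccum_getElem _ 0 k (by rw [hdl]; omega)]
    rw [sum_take_diffLoop nums.length queries hpre _ (by simp) k hk]
    have hz : ((List.replicate (nums.length + 1) (0 : Int)).take (k + 1)).sum = 0 := by
      simp [List.take_replicate]
    rw [hz]
    simp [List.countP_map]
    rfl
  have hsl := PySem.List.sorted_pairwise (queries.map altFst) (fun x => x)
  have hsr := PySem.List.sorted_pairwise (queries.map altSnd) (fun x => x)
  have hB : solve_alt nums queries
      = refIdx (PySem.List.sorted (queries.map altFst) (fun x => x) false)
               (PySem.List.sorted (queries.map altSnd) (fun x => x) false) nums 0 :=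
    altLoop_eq _ _ hsl hsr nums 0 0 0 (Nat.zero_le _) (Nat.zero_le _)
  rw [hA, hB]
  exact (refIdx_perm _ _ _ _ (PySem.List.sorted_perm _ _ _) (PySem.List.sorted_perm _ _ _) nums 0).symm
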